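-- pv_equiv track=rewrite | github.com/longytravel/ralphbasjh | ea_stress/workflow/steps/step03_extract.py | join_multiline_declarations
-- ===== SOURCE A (Python) =====
-- from typing import Dict, List, Optional, Set
--
-- def join_multiline_declarations(content: str) -> List[tuple[str, int]]:
--     """
--     Join multi-line declarations until semicolon.
--
--     Returns list of (declaration_text, start_line_number) tuples.
--     """
--     lines = content.split('\n')
--     declarations = []
--     current_decl = []
--     start_line = 0
--
--     for i, line in enumerate(lines):
--         line_num = i + 1
--         stripped = line.strip()
--
--         # Check if this looks like start of input declaration
--         # Match 'input' or 'sinput' at start (with or without space after)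
--         if not current_decl and (stripped.startswith('input') or stripped.startswith('sinput')):
--             # Make sure it's actually 'input' or 'sinput' keyword, not part of another word
--             if (stripped.startswith('input ') or stripped.startswith('sinput ') or
--                 stripped == 'input' or stripped == 'sinput'):
--                 current_decl = [line]
--                 start_line = line_num
--         elif current_decl:
--             current_decl.append(line)
--
--         # Check if we have a complete declaration (ends with semicolon)
--         if current_decl and ';' in line:
--             # Join the lines
--             full_decl = ' '.join(current_decl)
--             declarations.append((full_decl, start_line))
--             current_decl = []
--             start_line = 0
--
--     return declarations
-- ===== SOURCE B (Python) =====
-- def join_multiline_declarations(content: str):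
--     """
--     Join multi-line declarations until semicolon.
--
--     Returns list of (declaration_text, start_line_number) tuples.
--     """
--     lines = content.split('\n')
--     declarations = []
--     n = len(lines)
--     i = 0
--     while i < n:
--         stripped = lines[i].strip()
--         if (stripped.startswith('input ') or stripped.startswith('sinput ')
--                 or stripped == 'input' or stripped == 'sinput'):
--             # found a declaration start: collect lines until one contains ';'
--             start_line = i + 1
--             collected = []
--             j = i
--             while j < n and ';' not in lines[j]:
--                 collected.append(lines[j])
--                 j += 1
--             if j == n:
--                 break  # unterminated trailing declaration: discarded
--             collected.append(lines[j])
--             declarations.append((' '.join(collected), start_line))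
--             i = j + 1
--         else:
--             i += 1
--     return declarations
-- ===== Notes on version B (the rewrite author's own statement) =====
-- stated objective: alternative
-- what changed: Replaced A's single-pass flag/accumulator state machine (current_decl list doubling as an in-declaration flag, reset on each semicolon) by an index-driven parser: an outer while loop scans for a declaration start, and on finding one an inner while loop advances to the first semicolon-bearing line, emitting the joined declaration and resuming after it; unterminated trailing declarations fall out naturally.
import Mathlib
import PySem

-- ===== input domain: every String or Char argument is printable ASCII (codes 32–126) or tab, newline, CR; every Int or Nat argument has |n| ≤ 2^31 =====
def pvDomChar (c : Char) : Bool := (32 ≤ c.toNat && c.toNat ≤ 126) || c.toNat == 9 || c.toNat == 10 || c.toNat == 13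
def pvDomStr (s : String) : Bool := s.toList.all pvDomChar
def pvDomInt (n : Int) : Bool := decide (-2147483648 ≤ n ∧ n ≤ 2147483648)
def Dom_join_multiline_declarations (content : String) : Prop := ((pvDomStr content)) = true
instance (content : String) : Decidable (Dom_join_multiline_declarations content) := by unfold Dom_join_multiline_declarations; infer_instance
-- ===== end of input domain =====

-- B replaces A's one-pass flag/accumulator state machine by an index-driven outer scan with an
-- inner collect-until-semicolon loop (objective: alternative decomposition, same cost).

-- ===== PORT A =====
-- A's loop state: (declarations, current_decl, start_line).
def pvAStep (st : List (String × Int) × List String × Int) (p : Int × String) :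
    List (String × Int) × List String × Int :=
  let lineNum := p.1 + 1
  let stripped := PySem.Str.strip p.2
  let st1 :=
    if st.2.1.isEmpty &&
        (PySem.Str.startswith stripped "input" || PySem.Str.startswith stripped "sinput") then
      if PySem.Str.startswith stripped "input " || PySem.Str.startswith stripped "sinput " ||
          stripped == "input" || stripped == "sinput" then
        (st.1, [p.2], lineNum)
      else st
    else if !st.2.1.isEmpty then (st.1, st.2.1 ++ [p.2], st.2.2)
    else st
  if !st1.2.1.isEmpty && PySem.Str.isIn ";" p.2 then
    (st1.1 ++ [(PySem.Str.join " " st1.2.1, st1.2.2)], [], 0)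
  else st1

def join_multiline_declarations (content : String) : List (String × Int) :=
  let lines := (PySem.Str.split? content "\n").getD []
  ((PySem.List.enumerate lines 0).foldl pvAStep ([], [], 0)).1

-- ===== PORT B =====
-- the start-of-declaration test of Source B
def pvIsStart (stripped : String) : Bool :=
  PySem.Str.startswith stripped "input " || PySem.Str.startswith stripped "sinput " ||
    stripped == "input" || stripped == "sinput"

-- inner while loop of Source B: collect lines up to and including the first one containing ';';
-- returns (collected, remaining lines, absolute index j of the ';' line), none if input runs out.
def pvInner (acc : List String) (ls : List String) (j : Int) :
    Option (List String × List String × Int) :=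
  match ls with
  | [] => none
  | l :: rest =>
    if PySem.Str.isIn ";" l then some (acc ++ [l], rest, j)
    else pvInner (acc ++ [l]) rest (j + 1)

theorem pvInner_length {acc ls j c r x} (h : pvInner acc ls j = some (c, r, x)) :
    r.length < ls.length := by
  induction ls generalizing acc j with
  | nil => simp [pvInner] at h
  | cons l rest ih =>
    simp only [pvInner] at h
    split at h
    · cases h; simp
    · exact Nat.lt_succ_of_lt (ih h)

-- outer while loop of Source B over the remaining lines; i is the absolute index of the head line.
def pvOuter (ls : List String) (i : Int) : List (String × Int) :=
  match hls : ls with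
  | [] => []
  | l :: rest =>
    if pvIsStart (PySem.Str.strip l) then
      match hin : pvInner [] (l :: rest) i with
      | none => []
      | some (coll, rest', j) =>
        (PySem.Str.join " " coll, i + 1) :: pvOuter rest' (j + 1)
    else pvOuter rest (i + 1)
termination_by ls.length
decreasing_by
  · subst hls; exact pvInner_length hin
  · subst hls; simp

def join_multiline_declarations_alt (content : String) : List (String × Int) :=
  let lines := (PySem.Str.split? content "\n").getD []
  pvOuter lines 0

-- ===== PRECONDITION & SPEC =====
def Spec_join_multiline_declarations (content : String) (out : List (String × Int)) : Prop := out = join_multiline_declarations_alt content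
instance (content : String) (out : List (String × Int)) : Decidable (Spec_join_multiline_declarations content out) := by unfold Spec_join_multiline_declarations; infer_instance

-- ===== CLAIM (what is proved, stated in full; the proofs are below) =====
def Claim_equal_join_multiline_declarations : Prop := ∀ (content : String), Dom_join_multiline_declarations content → Spec_join_multiline_declarations content (join_multiline_declarations content)

-- ===== LEMMAS AND PROOFS =====

-- a line passing Source B's start test also passes A's outer 'input'/'sinput' prefix test
theorem pvIsStart_outer {s : String} (h : pvIsStart s = true) :
    (PySem.Str.startswith s "input" || PySem.Str.startswith s "sinput") = true := by
  simp only [pvIsStart, Bool.or_eq_true, beq_iff_eq, PySem.Str.startswith_eq,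
    PySem.Chars.startswith_iff] at h ⊢
  rcases h with ((h | h) | h) | h
  · exact Or.inl (List.IsPrefix.trans (by decide) h)
  · exact Or.inr (List.IsPrefix.trans (by decide) h)
  · subst h; exact Or.inl (by decide)
  · subst h; exact Or.inr (by decide)

-- the combined invariant: A's fold from an idle state is pvOuter, from a collecting state is pvInner
theorem pvMain (n : Nat) :
    (∀ (ls : List String), ls.length ≤ n → ∀ (i : Int) (decls : List (String × Int)) (s : Int),
      ((PySem.List.enumerate ls i).foldl pvAStep (decls, [], s)).1 = decls ++ pvOuter ls i) ∧
    (∀ (ls : List String), ls.length ≤ n → ∀ (i : Int) (decls : List (String × Int))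
        (cur : List String) (s : Int), cur ≠ [] →
      ((PySem.List.enumerate ls i).foldl pvAStep (decls, cur, s)).1 =
        decls ++ (match pvInner cur ls i with
          | none => []
          | some (coll, rest, j) =>
            (PySem.Str.join " " coll, s) :: pvOuter rest (j + 1))) := by
  induction n with
  | zero =>
    refine ⟨?_, ?_⟩ <;> intro ls hls <;>
      obtain rfl : ls = [] := List.length_eq_zero_iff.mp (Nat.le_zero.mp hls) <;>
      intros <;> simp [PySem.List.enumerate_nil, pvOuter, pvInner]
  | succ n ih =>
    refine ⟨?_, ?_⟩
    · intro ls hls i decls s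
      match ls with
      | [] => simp [PySem.List.enumerate_nil, pvOuter]
      | l :: rest =>
        have hr : rest.length ≤ n := by simpa using Nat.succ_le_succ_iff.mp (by simpa using hls)
        rw [PySem.List.enumerate_cons, List.foldl_cons, pvOuter]
        by_cases hstart : pvIsStart (PySem.Str.strip l) = true
        · have houter := pvIsStart_outer hstart
          have hstart' := hstart
          simp [pvIsStart] at houter hstart'
          by_cases hsemi : PySem.Chars.isIn [';'] l.toList = true
          · have hstep : pvAStep (decls, [], s) (i, l) =
                (decls ++ [(PySem.Str.join " " [l], i + 1)], [], 0) := by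
              simp [pvAStep, houter, hstart', hsemi]
            rw [hstep, (ih.1 rest hr (i + 1) _ 0), if_pos hstart]
            split
            · next hin => rw [show pvInner [] (l :: rest) i = some ([l], rest, i) by
                simp [pvInner, hsemi]] at hin; cases hin
            · next coll rest' j hin =>
              rw [show pvInner [] (l :: rest) i = some ([l], rest, i) by
                simp [pvInner, hsemi]] at hin
              obtain ⟨rfl, rfl, rfl⟩ : coll = [l] ∧ rest' = rest ∧ j = i := by
                simpa [eq_comm] using hin
              simp
          · have hstep : pvAStep (decls, [], s) (i, l) = (decls, [l], i + 1) := by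
              simp [pvAStep, houter, hstart', hsemi]
            rw [hstep, ih.2 rest hr (i + 1) decls [l] (i + 1) (by simp), if_pos hstart]
            have hd : pvInner [] (l :: rest) i = pvInner [l] rest (i + 1) := by
              simp [pvInner, hsemi]
            split
            · next hin =>
              split
              · rfl
              · next c2 r2 j2 hin2 => rw [hd, hin] at hin2; cases hin2
            · next coll rest' j hin =>
              split
              · next hin2 => rw [hd, hin] at hin2; cases hin2
              · next c2 r2 j2 hin2 =>
                rw [hd, hin] at hin2
                obtain ⟨rfl, rfl, rfl⟩ : c2 = coll ∧ r2 = rest' ∧ j2 = j := by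
                  simpa [eq_comm] using hin2
                rfl
        · have h4 := hstart
          simp [pvIsStart] at h4
          have hstep : pvAStep (decls, [], s) (i, l) = (decls, [], s) := by
            simp [pvAStep, h4]
          rw [hstep, ih.1 rest hr (i + 1) decls s]
          simp [hstart]
    · intro ls hls i decls cur s hcur
      match ls with
      | [] => simp [PySem.List.enumerate_nil, pvInner]
      | l :: rest =>
        have hr : rest.length ≤ n := by simpa using Nat.succ_le_succ_iff.mp (by simpa using hls)
        have hne : cur.isEmpty = false := by simpa [List.isEmpty_iff] using hcur
        rw [PySem.List.enumerate_cons, List.foldl_cons]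
        by_cases hsemi : PySem.Chars.isIn [';'] l.toList = true
        · have hstep : pvAStep (decls, cur, s) (i, l) =
              (decls ++ [(PySem.Str.join " " (cur ++ [l]), s)], [], 0) := by
            simp [pvAStep, hne, hsemi]
          rw [hstep, ih.1 rest hr (i + 1) _ 0,
            show pvInner cur (l :: rest) i = some (cur ++ [l], rest, i) by
              simp [pvInner, hsemi]]
          simp
        · have hstep : pvAStep (decls, cur, s) (i, l) = (decls, cur ++ [l], s) := by
            simp [pvAStep, hne, hsemi]
          rw [hstep, ih.2 rest hr (i + 1) decls (cur ++ [l]) s (by simp),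
            show pvInner cur (l :: rest) i = pvInner (cur ++ [l]) rest (i + 1) by
              simp [pvInner, hsemi]]

-- ===== VERDICT (by name: the statement is the Claim_ definition above) =====
theorem join_multiline_declarations_spec : Claim_equal_join_multiline_declarations := by
  intro content _
  unfold Spec_join_multiline_declarations join_multiline_declarations join_multiline_declarations_alt
  exact (pvMain ((PySem.Str.split? content "\n").getD []).length).1 _ le_rfl 0 [] 0
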